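-- pv_equiv track=rewrite | github.com/qkre/BAEKJOON | S1_1697.py | bfs
-- ===== SOURCE A (Python) =====
-- def bfs(start, end):
--     q = [start]
--     checked = [0] * 200001
--     checked[start] = 1
--
--     while q:
--         c = q.pop(0)
--
--         if c == end:
--             return checked[end] - 1
--
--         for n in (c-1, c+1, c*2):
--             if 0 <= n <= 200000 and checked[n] == 0:
--                 q.append(n)
--                 checked[n] = checked[c] + 1
-- ===== SOURCE B (Python) =====
-- def bfs(start, end):
--     seen = {start}
--     frontier = {start}
--     dist = 0
--     while frontier:
--         if end in frontier:
--             return dist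
--         frontier = {n for c in frontier for n in (c - 1, c + 1, c * 2)
--                     if 0 <= n <= 200000} - seen
--         seen |= frontier
--         dist += 1
-- ===== Notes on version B (the rewrite author's own statement) =====
-- stated objective: idiomatic
-- what changed: Replaces A's single FIFO queue with pop(0) and a per-node integer distance array (checked[n]=dist+1, answer read back as checked[end]-1) by a level-synchronous BFS over Python sets: a frontier set rebuilt each level by a set comprehension minus the seen set, and one depth counter.
-- outside the precondition, e.g. on bfs(-1, 199999): A returns 26, B returns 25; on bfs(250000, 3): A raises IndexError, B returns None; on bfs(5, 250000): A returns None, B returns None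
import Mathlib
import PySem

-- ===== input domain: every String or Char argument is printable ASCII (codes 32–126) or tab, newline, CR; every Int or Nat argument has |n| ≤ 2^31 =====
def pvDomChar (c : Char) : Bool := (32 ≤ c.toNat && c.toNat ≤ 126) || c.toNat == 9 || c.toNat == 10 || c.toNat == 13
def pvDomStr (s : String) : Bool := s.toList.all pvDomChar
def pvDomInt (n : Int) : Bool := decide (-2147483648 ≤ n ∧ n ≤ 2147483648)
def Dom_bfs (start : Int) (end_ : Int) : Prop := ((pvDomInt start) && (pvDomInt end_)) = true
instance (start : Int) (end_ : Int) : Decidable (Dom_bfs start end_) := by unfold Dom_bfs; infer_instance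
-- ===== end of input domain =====

-- B replaces A's FIFO queue with per-node distance labels by a level-synchronous BFS on
-- Python sets (frontier set rebuilt each level minus the seen set, one depth counter);
-- equal return values on Pre_.

-- ===== PORT A =====
-- Python's `checked = [0] * 200001` array is ported as a hash map with default 0; the stored
-- labels are Python's ints, always nonnegative here, kept as Nat (read back as Int at the
-- `return checked[end] - 1` site). Python's list `q`, used purely as a FIFO via q.pop(0) /
-- q.append, is ported as the standard two-list queue (pop from `front`, prepend to `back`,
-- flip when `front` empties) so that evaluation stays linear: the same nodes are popped and
-- appended in the same order. The loop runs on a fuel of 500000 iterations — more than the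
-- 200001 possible enqueues plus one flip per level — so the guard never fires where
-- Python's loop runs. Exact on Pre_ (in-range indices).
def pvNbrs (c : Int) : List Int := [c - 1, c + 1, c * 2]

-- the `for n in (c-1, c+1, c*2)` body of A: guard, append to queue, set label checked[c]+1
def pvStepA (c : Int) (s : List Int × Std.HashMap Int Nat) (n : Int) :
    List Int × Std.HashMap Int Nat :=
  if 0 ≤ n ∧ n ≤ 200000 ∧ s.2.getD n 0 = 0 then
    (n :: s.1, s.2.insert n (s.2.getD c 0 + 1))
  else s

-- the `while q:` loop of A (the empty-queue => 0 branch is Python's fall-through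
-- `return None`, unreachable on Pre_; fuel 0 is never reached where Python's loop runs)
def pvLoopA (fuel : Nat) (end_ : Int) (front back : List Int)
    (ch : Std.HashMap Int Nat) : Int :=
  match fuel with
  | 0 => 0
  | fuel + 1 =>
    match front with
    | [] =>
      match back with
      | [] => 0
      | _ :: _ => pvLoopA fuel end_ back.reverse [] ch
    | c :: rest =>
      if c = end_ then (ch.getD end_ 0 : Int) - 1
      else
        let s := (pvNbrs c).foldl (pvStepA c) (back, ch)
        pvLoopA fuel end_ rest s.1 s.2

def bfs (start : Int) (end_ : Int) : Int :=
  pvLoopA 500000 end_ [start] [] ((∅ : Std.HashMap Int Nat).insert start 1)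

-- ===== PORT B =====
-- port of Source B: the `seen` Python set is held as a Std.HashSet (only membership is ever
-- taken from it, so hash order cannot matter); the frontier set is held as the list of its
-- distinct elements. pvNewFront computes `{n for ... if 0 <= n <= 200000} - seen` together
-- with `seen |= frontier` in one recursion over the candidate list: inserting each kept
-- candidate into `seen` at once is what makes the result duplicate-free, and it produces
-- exactly the new frontier set and the updated seen set of Source B. The loop runs on a fuel
-- of 200003 levels, more than one per markable cell, so it never fires.

-- the in-range neighbour candidates of one level's frontier
def pvCands (frontier : List Int) : List Int :=
  (frontier.flatMap (fun c => [c - 1, c + 1, c * 2])).filter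
    (fun n => decide (0 ≤ n) && decide (n ≤ 200000))

-- new frontier set (distinct, unseen candidates, accumulated tail-recursively; only its
-- membership is ever consumed, matching a Python set) and updated seen set
def pvNewFront (cands : List Int) (seen : Std.HashSet Int) (acc : List Int) :
    List Int × Std.HashSet Int :=
  match cands with
  | [] => (acc, seen)
  | n :: rest =>
    if seen.contains n then pvNewFront rest seen acc
    else pvNewFront rest (seen.insert n) (n :: acc)

-- the `while frontier:` loop of B (empty frontier => 0 is Python's fall-through
-- `return None`, unreachable on Pre_)
def pvLoopB (fuel : Nat) (end_ : Int) (frontier : List Int) (seen : Std.HashSet Int)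
    (dist : Int) : Int :=
  match fuel with
  | 0 => 0
  | fuel + 1 =>
    if frontier = [] then 0
    else if end_ ∈ frontier then dist
    else
      match pvNewFront (pvCands frontier) seen [] with
      | (nf, seen') => pvLoopB fuel end_ nf seen' (dist + 1)

def bfs_alt (start : Int) (end_ : Int) : Int :=
  pvLoopB 200003 end_ [start] ((∅ : Std.HashSet Int).insert start) 0

-- ===== PRECONDITION & SPEC =====
-- Pre_ is the problem's natural index range 0..200000 for both arguments: outside it A
-- raises IndexError (|start| beyond the array), returns None (end outside the array is
-- never dequeued), or — for start in [-200001,-1] — returns a value produced by Python's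
-- negative-index wraparound into the checked array, which the ports do not emulate.
def Pre_bfs (start : Int) (end_ : Int) : Prop :=
  0 ≤ start ∧ start ≤ 200000 ∧ 0 ≤ end_ ∧ end_ ≤ 200000
instance (start : Int) (end_ : Int) : Decidable (Pre_bfs start end_) := by
  unfold Pre_bfs; infer_instance

def pvWitness_bfs : Int × Int := (3, 10)

def Spec_bfs (start : Int) (end_ : Int) (out : Int) : Prop := out = bfs_alt start end_
instance (start : Int) (end_ : Int) (out : Int) : Decidable (Spec_bfs start end_ out) := by
  unfold Spec_bfs; infer_instance

-- ===== CLAIM (what is proved, stated in full; the proofs are below) =====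
def Claim_equal_bfs : Prop :=
  ∀ (start : Int) (end_ : Int), Dom_bfs start end_ → Pre_bfs start end_ →
    Spec_bfs start end_ (bfs start end_)

-- ===== LEMMAS AND PROOFS =====

-- proof-side mirror of one guarded enqueue of A, producing the level's additions IN ORDER
-- (appended at the end of an accumulator) together with a boolean visited map
def pvStepH (s : List Int × Std.HashMap Int Bool) (n : Int) :
    List Int × Std.HashMap Int Bool :=
  if 0 ≤ n ∧ n ≤ 200000 ∧ s.2.getD n false = false then
    (s.1 ++ [n], s.2.insert n true)
  else s

-- number of still-unmarked slots of the 200001-cell array (a bound on remaining enqueues)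
def pvCzA (ch : Std.HashMap Int Nat) : Nat :=
  ((Finset.range 200001).filter (fun k : Nat => ch.getD (k : Int) 0 = 0)).card

theorem pvCzA_insert (ch : Std.HashMap Int Nat) (n : Int) (v : Nat)
    (h0 : 0 ≤ n) (h1 : n ≤ 200000) (h2 : ch.getD n 0 = 0) :
    pvCzA (ch.insert n (v + 1)) + 1 = pvCzA ch := by
  have hmem : n.toNat ∈ (Finset.range 200001).filter (fun k : Nat => ch.getD (k : Int) 0 = 0) := by
    simp only [Finset.mem_filter, Finset.mem_range]
    constructor
    · omega
    · rwa [Int.toNat_of_nonneg h0]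
  have hset : (Finset.range 200001).filter
        (fun k : Nat => (ch.insert n (v + 1)).getD (k : Int) 0 = 0)
      = ((Finset.range 200001).filter (fun k : Nat => ch.getD (k : Int) 0 = 0)).erase n.toNat := by
    have hcast : ((n.toNat : Int)) = n := Int.toNat_of_nonneg h0
    ext k
    simp only [Finset.mem_filter, Finset.mem_range, Finset.mem_erase, Std.HashMap.getD_insert]
    by_cases hk : k = n.toNat
    · subst hk
      simp [hcast]
    · have hkn : (n == (k : Int)) = false := by
        rw [beq_eq_false_iff_ne]
        intro hEq
        exact hk (by omega)
      simp only [hkn, Bool.false_eq_true, if_false, ne_eq, hk, not_false_eq_true, true_and]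
  unfold pvCzA
  rw [hset, Finset.card_erase_of_mem hmem]
  have := Finset.card_pos.mpr ⟨n.toNat, hmem⟩
  omega

theorem pvCzA_le (ch : Std.HashMap Int Nat) : pvCzA ch ≤ 200001 := by
  unfold pvCzA
  exact (Finset.card_filter_le _ _).trans (by simp)

-- visited-set agreement between A's label array and the proof-side boolean map
def pvHVis (ch : Std.HashMap Int Nat) (vis : Std.HashMap Int Bool) : Prop :=
  ∀ n : Int, (ch.getD n 0 = 0 ↔ vis.getD n false = false)

-- one neighbour: A's guarded prepend+label and the mirror's guarded append+mark move in
-- lock step (A's back list is the reverse of the mirror's accumulator)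
theorem pvPairStep (c n : Int) (d : Nat)
    (acc : List Int) (ch : Std.HashMap Int Nat) (vis : Std.HashMap Int Bool)
    (hv : pvHVis ch vis) (hc : ch.getD c 0 = d + 1)
    (hacc : ∀ x ∈ acc, ch.getD x 0 = d + 2) :
    (pvStepA c (acc.reverse, ch) n).1 = (pvStepH (acc, vis) n).1.reverse ∧
    (pvStepA c (acc.reverse, ch) n).2.getD c 0 = d + 1 ∧
    pvHVis (pvStepA c (acc.reverse, ch) n).2 (pvStepH (acc, vis) n).2 ∧
    (∀ x : Int, ch.getD x 0 ≠ 0 → (pvStepA c (acc.reverse, ch) n).2.getD x 0 = ch.getD x 0) ∧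
    (∀ x ∈ (pvStepH (acc, vis) n).1, (pvStepA c (acc.reverse, ch) n).2.getD x 0 = d + 2) ∧
    pvCzA (pvStepA c (acc.reverse, ch) n).2 + (pvStepH (acc, vis) n).1.length
      = pvCzA ch + acc.length := by
  by_cases hg : 0 ≤ n ∧ n ≤ 200000 ∧ ch.getD n 0 = 0
  · have hgB : 0 ≤ n ∧ n ≤ 200000 ∧ vis.getD n false = false :=
      ⟨hg.1, hg.2.1, (hv n).mp hg.2.2⟩
    have hnc : (n == c) = false := by
      rw [beq_eq_false_iff_ne]
      intro hEq
      rw [hEq] at hg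
      omega
    simp only [pvStepA, pvStepH, hg, hgB, if_pos, and_self]
    refine ⟨by simp, ?_, ?_, ?_, ?_, ?_⟩
    · simp only [Std.HashMap.getD_insert, hnc, Bool.false_eq_true, if_false]
      exact hc
    · intro x
      simp only [Std.HashMap.getD_insert]
      by_cases hx : (n == x) = true
      · simp [hx, hc]
      · simp only [hx, Bool.false_eq_true, if_false]
        exact hv x
    · intro x hx
      simp only [Std.HashMap.getD_insert]
      have hnx : (n == x) = false := by
        rw [beq_eq_false_iff_ne]
        intro hEq
        rw [hEq] at hg
        exact hx hg.2.2
      simp [hnx]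
    · intro x hx
      rcases List.mem_append.mp hx with hx | hx
      · have hxv : ch.getD x 0 = d + 2 := hacc x hx
        have hnx : (n == x) = false := by
          rw [beq_eq_false_iff_ne]
          intro hEq
          rw [← hEq, hg.2.2] at hxv
          omega
        simp [Std.HashMap.getD_insert, hnx, hxv]
      · have hxn : x = n := by simpa using hx
        subst hxn
        simp [hc]
    · have := pvCzA_insert ch n (ch.getD c 0) hg.1 hg.2.1 hg.2.2
      simp only [List.length_append, List.length_cons, List.length_nil]
      omega
  · have hgB : ¬ (0 ≤ n ∧ n ≤ 200000 ∧ vis.getD n false = false) := by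
      intro h
      exact hg ⟨h.1, h.2.1, (hv n).mpr h.2.2⟩
    have eA : pvStepA c (acc.reverse, ch) n = (acc.reverse, ch) := by
      simp [pvStepA, hg]
    have eB : pvStepH (acc, vis) n = (acc, vis) := by
      simp [pvStepH, hgB]
    rw [eA, eB]
    exact ⟨rfl, hc, hv, fun x _ => rfl, hacc, rfl⟩

-- the whole 3-neighbour fold of one popped node c, paired with the mirror fold
theorem pvPair (ns : List Int) (c : Int) (d : Nat) :
    ∀ (acc : List Int) (ch : Std.HashMap Int Nat) (vis : Std.HashMap Int Bool),
    pvHVis ch vis → ch.getD c 0 = d + 1 → (∀ x ∈ acc, ch.getD x 0 = d + 2) →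
    (ns.foldl (pvStepA c) (acc.reverse, ch)).1 = (ns.foldl pvStepH (acc, vis)).1.reverse ∧
    (ns.foldl (pvStepA c) (acc.reverse, ch)).2.getD c 0 = d + 1 ∧
    pvHVis (ns.foldl (pvStepA c) (acc.reverse, ch)).2 (ns.foldl pvStepH (acc, vis)).2 ∧
    (∀ x : Int, ch.getD x 0 ≠ 0 →
      (ns.foldl (pvStepA c) (acc.reverse, ch)).2.getD x 0 = ch.getD x 0) ∧
    (∀ x ∈ (ns.foldl pvStepH (acc, vis)).1,
      (ns.foldl (pvStepA c) (acc.reverse, ch)).2.getD x 0 = d + 2) ∧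
    pvCzA (ns.foldl (pvStepA c) (acc.reverse, ch)).2 + (ns.foldl pvStepH (acc, vis)).1.length
      = pvCzA ch + acc.length := by
  induction ns with
  | nil =>
    intro acc ch vis hv hc hacc
    exact ⟨rfl, hc, hv, fun x _ => rfl, hacc, rfl⟩
  | cons n ns ih =>
    intro acc ch vis hv hc hacc
    obtain ⟨h1, h2, h3, h4, h5, h6⟩ := pvPairStep c n d acc ch vis hv hc hacc
    have hrw : pvStepA c (acc.reverse, ch) n
        = ((pvStepH (acc, vis) n).1.reverse, (pvStepA c (acc.reverse, ch) n).2) :=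
      Prod.ext h1 rfl
    obtain ⟨g1, g2, g3, g4, g5, g6⟩ :=
      ih (pvStepH (acc, vis) n).1 (pvStepA c (acc.reverse, ch) n).2 (pvStepH (acc, vis) n).2
        h3 h2 h5
    rw [← hrw] at g1 g2 g3 g4 g5 g6
    simp only [Prod.mk.eta] at g1 g2 g3 g4 g5 g6
    simp only [List.foldl_cons]
    refine ⟨g1, g2, g3, ?_, g5, by omega⟩
    intro x hx
    have hx2 : (pvStepA c (acc.reverse, ch) n).2.getD x 0 = ch.getD x 0 := h4 x hx
    rw [g4 x (by rw [hx2]; exact hx), hx2]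

-- processing the remainder `proc` of the current level: A's front list is `proc`, its back
-- list the reverse of the additions `pend` so far; one fuel unit per popped node
theorem pvInner (end_ : Int) (d : Nat) :
    ∀ (proc pend : List Int) (ch : Std.HashMap Int Nat) (vis : Std.HashMap Int Bool),
    pvHVis ch vis →
    (∀ x ∈ proc, ch.getD x 0 = d + 1) →
    (∀ x ∈ pend, ch.getD x 0 = d + 2) →
    (end_ ∈ proc →
      ∀ f : Nat, pvLoopA (f + proc.length) end_ proc pend.reverse ch = (d : Int)) ∧
    (end_ ∉ proc → ∃ ch' : Std.HashMap Int Nat,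
      (∀ f : Nat, pvLoopA (f + proc.length) end_ proc pend.reverse ch
        = pvLoopA f end_ []
            (proc.foldl (fun a c => (pvNbrs c).foldl pvStepH a) (pend, vis)).1.reverse ch') ∧
      pvHVis ch' (proc.foldl (fun a c => (pvNbrs c).foldl pvStepH a) (pend, vis)).2 ∧
      (∀ x ∈ (proc.foldl (fun a c => (pvNbrs c).foldl pvStepH a) (pend, vis)).1,
        ch'.getD x 0 = d + 2) ∧
      pvCzA ch' + (proc.foldl (fun a c => (pvNbrs c).foldl pvStepH a) (pend, vis)).1.length
        = pvCzA ch + pend.length) := by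
  intro proc
  induction proc with
  | nil =>
    intro pend ch vis hv _ hpend
    constructor
    · intro h
      simp at h
    · intro _
      exact ⟨ch, fun f => rfl, hv, hpend, rfl⟩
  | cons c proc ih =>
    intro pend ch vis hv hproc hpend
    have hc : ch.getD c 0 = d + 1 := hproc c (List.mem_cons_self ..)
    by_cases hce : c = end_
    · subst hce
      constructor
      · intro _ f
        have hf : f + (c :: proc).length = (f + proc.length) + 1 := by
          simp only [List.length_cons]
          omega
        rw [hf, pvLoopA, if_pos rfl, hc]
        push_cast
        ring
      · intro hno
        exact absurd (List.mem_cons_self ..) hno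
    · obtain ⟨p1, p2, p3, p4, p5, p6⟩ :=
        pvPair (pvNbrs c) c d pend ch vis hv hc hpend
      have hstep : ∀ f : Nat, pvLoopA (f + 1) end_ (c :: proc) pend.reverse ch
          = pvLoopA f end_ proc ((pvNbrs c).foldl (pvStepA c) (pend.reverse, ch)).1
              ((pvNbrs c).foldl (pvStepA c) (pend.reverse, ch)).2 := by
        intro f
        rw [pvLoopA]
        simp [hce]
      have hproc' : ∀ x ∈ proc,
          ((pvNbrs c).foldl (pvStepA c) (pend.reverse, ch)).2.getD x 0 = d + 1 := by
        intro x hx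
        rw [p4 x (by rw [hproc x (List.mem_cons_of_mem _ hx)]; omega)]
        exact hproc x (List.mem_cons_of_mem _ hx)
      obtain ⟨ihin, ihout⟩ :=
        ih ((pvNbrs c).foldl pvStepH (pend, vis)).1
          ((pvNbrs c).foldl (pvStepA c) (pend.reverse, ch)).2
          ((pvNbrs c).foldl pvStepH (pend, vis)).2 p3 hproc' p5
      rw [← p1] at ihin ihout
      simp only [Prod.mk.eta] at ihin ihout
      constructor
      · intro hmem f
        have hmem' : end_ ∈ proc := by
          rcases List.mem_cons.mp hmem with h | h
          · exact absurd h.symm hce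
          · exact h
        have hf : f + (c :: proc).length = (f + proc.length) + 1 := by
          simp only [List.length_cons]
          omega
        rw [hf, hstep]
        exact ihin hmem' f
      · intro hno
        have hno' : end_ ∉ proc := fun h => hno (List.mem_cons_of_mem _ h)
        obtain ⟨ch', e1, e2, e3, e4⟩ := ihout hno'
        have hfold : (c :: proc).foldl (fun a c => (pvNbrs c).foldl pvStepH a) (pend, vis)
            = proc.foldl (fun a c => (pvNbrs c).foldl pvStepH a)
                (((pvNbrs c).foldl pvStepH (pend, vis)).1,
                 ((pvNbrs c).foldl pvStepH (pend, vis)).2) := rfl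
        refine ⟨ch', ?_, ?_, ?_, ?_⟩
        · intro f
          have hf : f + (c :: proc).length = (f + proc.length) + 1 := by
            simp only [List.length_cons]
            omega
          rw [hfold, hf, hstep]
          simp only [Prod.mk.eta]
          exact e1 f
        · rw [hfold]
          simp only [Prod.mk.eta]
          exact e2
        · rw [hfold]
          simp only [Prod.mk.eta]
          exact e3
        · rw [hfold]
          simp only [Prod.mk.eta]
          omega

-- membership characterisation of the mirror fold over one node's neighbour triple
theorem pvStepH_fold (ns : List Int) :
    ∀ (acc : List Int) (vis : Std.HashMap Int Bool),
    (∀ x ∈ acc, vis.getD x false = true) →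
    (∀ x : Int, x ∈ (ns.foldl pvStepH (acc, vis)).1 ↔
      x ∈ acc ∨ (x ∈ ns ∧ 0 ≤ x ∧ x ≤ 200000 ∧ vis.getD x false = false)) ∧
    (∀ x : Int, (ns.foldl pvStepH (acc, vis)).2.getD x false = true ↔
      vis.getD x false = true ∨ x ∈ (ns.foldl pvStepH (acc, vis)).1) := by
  induction ns with
  | nil =>
    intro acc vis hacc
    constructor
    · intro x
      simp
    · intro x
      simp only [List.foldl_nil]
      constructor
      · intro h
        exact Or.inl h
      · rintro (h | h)
        · exact h
        · exact hacc x h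
  | cons n ns ih =>
    intro acc vis hacc
    by_cases hg : 0 ≤ n ∧ n ≤ 200000 ∧ vis.getD n false = false
    · have estep : pvStepH (acc, vis) n = (acc ++ [n], vis.insert n true) := by
        simp [pvStepH, hg]
      have hacc' : ∀ x ∈ acc ++ [n], (vis.insert n true).getD x false = true := by
        intro x hx
        simp only [Std.HashMap.getD_insert]
        rcases List.mem_append.mp hx with hx | hx
        · by_cases hnx : (n == x) = true
          · simp [hnx]
          · simp only [hnx, Bool.false_eq_true, if_false]
            exact hacc x hx
        · have hxe : x = n := by simpa using hx
          subst hxe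
          simp
      obtain ⟨ia, ib⟩ := ih (acc ++ [n]) (vis.insert n true) hacc'
      simp only [List.foldl_cons, estep]
      constructor
      · intro x
        rw [ia x]
        constructor
        · rintro (hx | ⟨hx1, hx2, hx3, hx4⟩)
          · rcases List.mem_append.mp hx with hx | hx
            · exact Or.inl hx
            · have hxe : x = n := by simpa using hx
              subst hxe
              exact Or.inr ⟨List.mem_cons_self .., hg⟩
          · have hxn : x ≠ n := by
              intro h
              subst h
              simp at hx4
            have hnx : (n == x) = false := by
              rw [beq_eq_false_iff_ne]
              exact fun h => hxn h.symm
            simp only [Std.HashMap.getD_insert, hnx, Bool.false_eq_true, if_false] at hx4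
            exact Or.inr ⟨List.mem_cons_of_mem _ hx1, hx2, hx3, hx4⟩
        · rintro (hx | ⟨hx1, hx2, hx3, hx4⟩)
          · exact Or.inl (List.mem_append.mpr (Or.inl hx))
          · by_cases hxn : x = n
            · subst hxn
              exact Or.inl (List.mem_append.mpr (Or.inr (by simp)))
            · have hx1' : x ∈ ns := by
                rcases List.mem_cons.mp hx1 with h | h
                · exact absurd h hxn
                · exact h
              have hnx : (n == x) = false := by
                rw [beq_eq_false_iff_ne]
                exact fun h => hxn h.symm
              refine Or.inr ⟨hx1', hx2, hx3, ?_⟩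
              simp only [Std.HashMap.getD_insert, hnx, Bool.false_eq_true, if_false]
              exact hx4
      · intro x
        rw [ib x]
        constructor
        · rintro (hx | hx)
          · by_cases hnx : (n == x) = true
            · have hxn : x = n := (eq_of_beq hnx).symm
              subst hxn
              exact Or.inr ((ia x).mpr (Or.inl (List.mem_append.mpr (Or.inr (by simp)))))
            · have hnx' : (n == x) = false := by
                cases h : (n == x)
                · rfl
                · exact absurd h hnx
              simp only [Std.HashMap.getD_insert, hnx', Bool.false_eq_true, if_false] at hx
              exact Or.inl hx
          · exact Or.inr hx
        · rintro (hx | hx)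
          · refine Or.inl ?_
            simp only [Std.HashMap.getD_insert]
            by_cases hnx : (n == x) = true
            · simp [hnx]
            · simp only [hnx, Bool.false_eq_true, if_false]
              exact hx
          · exact Or.inr hx
    · have estep : pvStepH (acc, vis) n = (acc, vis) := by
        simp [pvStepH, hg]
      obtain ⟨ia, ib⟩ := ih acc vis hacc
      simp only [List.foldl_cons, estep]
      constructor
      · intro x
        rw [ia x]
        constructor
        · rintro (hx | ⟨hx1, hx2, hx3, hx4⟩)
          · exact Or.inl hx
          · exact Or.inr ⟨List.mem_cons_of_mem _ hx1, hx2, hx3, hx4⟩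
        · rintro (hx | ⟨hx1, hx2, hx3, hx4⟩)
          · exact Or.inl hx
          · rcases List.mem_cons.mp hx1 with h | h
            · subst h
              exact absurd ⟨hx2, hx3, hx4⟩ hg
            · exact Or.inr ⟨h, hx2, hx3, hx4⟩
      · exact ib

-- membership characterisation of the whole mirror level fold
theorem pvFoldH_mem (proc : List Int) :
    ∀ (acc : List Int) (vis : Std.HashMap Int Bool),
    (∀ x ∈ acc, vis.getD x false = true) →
    (∀ x : Int, x ∈ (proc.foldl (fun a c => (pvNbrs c).foldl pvStepH a) (acc, vis)).1 ↔
      x ∈ acc ∨ ((∃ c ∈ proc, x ∈ pvNbrs c) ∧ 0 ≤ x ∧ x ≤ 200000 ∧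
        vis.getD x false = false)) ∧
    (∀ x : Int,
      (proc.foldl (fun a c => (pvNbrs c).foldl pvStepH a) (acc, vis)).2.getD x false = true ↔
      vis.getD x false = true ∨
        x ∈ (proc.foldl (fun a c => (pvNbrs c).foldl pvStepH a) (acc, vis)).1) := by
  induction proc with
  | nil =>
    intro acc vis hacc
    constructor
    · intro x
      simp
    · intro x
      simp only [List.foldl_nil]
      constructor
      · intro h
        exact Or.inl h
      · rintro (h | h)
        · exact h
        · exact hacc x h
  | cons c proc ih =>
    intro acc vis hacc
    obtain ⟨sa, sb⟩ := pvStepH_fold (pvNbrs c) acc vis hacc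
    have hacc1 : ∀ x ∈ ((pvNbrs c).foldl pvStepH (acc, vis)).1,
        ((pvNbrs c).foldl pvStepH (acc, vis)).2.getD x false = true := by
      intro x hx
      exact (sb x).mpr (Or.inr hx)
    obtain ⟨ia, ib⟩ := ih ((pvNbrs c).foldl pvStepH (acc, vis)).1
      ((pvNbrs c).foldl pvStepH (acc, vis)).2 hacc1
    have hfold : (c :: proc).foldl (fun a c => (pvNbrs c).foldl pvStepH a) (acc, vis)
        = proc.foldl (fun a c => (pvNbrs c).foldl pvStepH a)
            (((pvNbrs c).foldl pvStepH (acc, vis)).1,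
             ((pvNbrs c).foldl pvStepH (acc, vis)).2) := rfl
    rw [hfold]
    simp only [Prod.mk.eta] at ia ib ⊢
    constructor
    · intro x
      rw [ia x]
      constructor
      · rintro (hx | ⟨hx1, hx2, hx3, hx4⟩)
        · rcases (sa x).mp hx with h | ⟨h1, h2, h3, h4⟩
          · exact Or.inl h
          · exact Or.inr ⟨⟨c, List.mem_cons_self .., h1⟩, h2, h3, h4⟩
        · have hvx : vis.getD x false = false := by
            cases h : vis.getD x false
            · rfl
            · have ht := (sb x).mpr (Or.inl h)
              rw [ht] at hx4
              cases hx4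
          obtain ⟨cc, hcc, hxc⟩ := hx1
          exact Or.inr ⟨⟨cc, List.mem_cons_of_mem _ hcc, hxc⟩, hx2, hx3, hvx⟩
      · rintro (hx | ⟨⟨cc, hcc, hxc⟩, hx2, hx3, hx4⟩)
        · exact Or.inl ((sa x).mpr (Or.inl hx))
        · rcases List.mem_cons.mp hcc with h | h
          · subst h
            exact Or.inl ((sa x).mpr (Or.inr ⟨hxc, hx2, hx3, hx4⟩))
          · by_cases hin : x ∈ ((pvNbrs c).foldl pvStepH (acc, vis)).1
            · exact Or.inl hin
            · have hs2 : ((pvNbrs c).foldl pvStepH (acc, vis)).2.getD x false = false := by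
                cases hh : ((pvNbrs c).foldl pvStepH (acc, vis)).2.getD x false
                · rfl
                · rcases (sb x).mp hh with hv' | hm'
                  · rw [hv'] at hx4
                    cases hx4
                  · exact absurd hm' hin
              exact Or.inr ⟨⟨cc, h, hxc⟩, hx2, hx3, hs2⟩
    · intro x
      rw [ib x]
      constructor
      · rintro (hx | hx)
        · rcases (sb x).mp hx with hv | hm
          · exact Or.inl hv
          · exact Or.inr ((ia x).mpr (Or.inl hm))
        · exact Or.inr hx
      · rintro (hx | hx)
        · exact Or.inl ((sb x).mpr (Or.inl hx))
        · exact Or.inr hx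

-- membership characterisation of B's fused new-frontier/seen computation
theorem pvNewFront_mem (cands : List Int) :
    ∀ (seen : Std.HashSet Int) (acc : List Int),
    (∀ x ∈ acc, seen.contains x = true) →
    (∀ x : Int, x ∈ (pvNewFront cands seen acc).1 ↔
      x ∈ acc ∨ (x ∈ cands ∧ seen.contains x = false)) ∧
    (∀ x : Int, (pvNewFront cands seen acc).2.contains x = true ↔
      seen.contains x = true ∨ x ∈ (pvNewFront cands seen acc).1) := by
  induction cands with
  | nil =>
    intro seen acc hacc
    constructor
    · intro x
      simp [pvNewFront]
    · intro x
      simp only [pvNewFront]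
      constructor
      · intro h
        exact Or.inl h
      · rintro (h | h)
        · exact h
        · exact hacc x h
  | cons n rest ih =>
    intro seen acc hacc
    by_cases hn : seen.contains n = true
    · have e : pvNewFront (n :: rest) seen acc = pvNewFront rest seen acc := by
        simp [pvNewFront, hn]
      obtain ⟨ia, ib⟩ := ih seen acc hacc
      rw [e]
      constructor
      · intro x
        rw [ia x]
        constructor
        · rintro (hx | ⟨h1, h2⟩)
          · exact Or.inl hx
          · exact Or.inr ⟨List.mem_cons_of_mem _ h1, h2⟩
        · rintro (hx | ⟨h1, h2⟩)
          · exact Or.inl hx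
          · rcases List.mem_cons.mp h1 with h | h
            · subst h
              rw [hn] at h2
              cases h2
            · exact Or.inr ⟨h, h2⟩
      · exact ib
    · have hnf : seen.contains n = false := by
        cases h : seen.contains n
        · rfl
        · exact absurd h hn
      have e : pvNewFront (n :: rest) seen acc
          = pvNewFront rest (seen.insert n) (n :: acc) := by
        rw [pvNewFront]
        simp only [hnf, Bool.false_eq_true, if_false]
      have hacc' : ∀ x ∈ n :: acc, (seen.insert n).contains x = true := by
        intro x hx
        rw [Std.HashSet.contains_insert]
        rcases List.mem_cons.mp hx with h | h
        · subst h
          simp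
        · simp [hacc x h]
      obtain ⟨ia, ib⟩ := ih (seen.insert n) (n :: acc) hacc'
      rw [e]
      constructor
      · intro x
        rw [ia x]
        constructor
        · rintro (hx | ⟨h1, h2⟩)
          · rcases List.mem_cons.mp hx with h | h
            · subst h
              exact Or.inr ⟨List.mem_cons_self .., hnf⟩
            · exact Or.inl h
          · have hnx : (n == x) = false := by
              cases h : (n == x)
              · rfl
              · rw [Std.HashSet.contains_insert, h] at h2
                simp at h2
            rw [Std.HashSet.contains_insert, hnx] at h2
            simp only [Bool.false_or] at h2
            exact Or.inr ⟨List.mem_cons_of_mem _ h1, h2⟩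
        · rintro (hx | ⟨h1, h2⟩)
          · exact Or.inl (List.mem_cons_of_mem _ hx)
          · by_cases hxn : x = n
            · subst hxn
              exact Or.inl (List.mem_cons_self ..)
            · have h1' : x ∈ rest := by
                rcases List.mem_cons.mp h1 with h | h
                · exact absurd h hxn
                · exact h
              have hnx : (n == x) = false := by
                rw [beq_eq_false_iff_ne]
                exact fun h => hxn h.symm
              refine Or.inr ⟨h1', ?_⟩
              rw [Std.HashSet.contains_insert, hnx]
              simpa using h2
      · intro x
        rw [ib x]
        constructor
        · rintro (hx | hx)
          · rw [Std.HashSet.contains_insert] at hx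
            rcases Bool.or_eq_true_iff.mp hx with h | h
            · have hxn : x = n := (eq_of_beq h).symm
              subst hxn
              exact Or.inr ((ia x).mpr (Or.inl (List.mem_cons_self ..)))
            · exact Or.inl h
          · exact Or.inr hx
        · rintro (hx | hx)
          · refine Or.inl ?_
            rw [Std.HashSet.contains_insert]
            simp [hx]
          · exact Or.inr hx

-- every fuel returns 0 on the empty queue / empty frontier
theorem pvLoopA_nil (f : Nat) (end_ : Int) (ch : Std.HashMap Int Nat) :
    pvLoopA f end_ [] [] ch = 0 := by
  cases f <;> rfl

theorem pvLoopB_nil (f : Nat) (end_ : Int) (seen : Std.HashSet Int) (dist : Int) :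
    pvLoopB f end_ [] seen dist = 0 := by
  cases f <;> simp [pvLoopB]

-- level-by-level simulation: A's front list at a level start and B's frontier hold the
-- same elements; A's fuel covers the remaining pops and flips, B's the remaining levels
theorem pvSim (end_ : Int) :
    ∀ (fB : Nat) (frontA frontB : List Int) (ch : Std.HashMap Int Nat)
      (vis : Std.HashMap Int Bool) (seen : Std.HashSet Int) (d fA : Nat),
    2 * pvCzA ch + frontA.length + 2 ≤ fA →
    pvCzA ch + 2 ≤ fB →
    pvHVis ch vis →
    (∀ x : Int, vis.getD x false = false ↔ seen.contains x = false) →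
    (∀ x : Int, x ∈ frontA ↔ x ∈ frontB) →
    (∀ x ∈ frontA, ch.getD x 0 = d + 1) →
    pvLoopA fA end_ frontA [] ch = pvLoopB fB end_ frontB seen (d : Int) := by
  intro fB
  induction fB with
  | zero =>
    intro frontA frontB ch vis seen d fA hA hB hv hseen hfr hfront
    omega
  | succ fB ih =>
    intro frontA frontB ch vis seen d fA hA hB hv hseen hfr hfront
    by_cases hBempty : frontB = []
    · subst hBempty
      have hAempty : frontA = [] := by
        rw [List.eq_nil_iff_forall_not_mem]
        intro x hx
        exact (List.not_mem_nil).elim ((hfr x).mp hx)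
      subst hAempty
      rw [pvLoopA_nil, pvLoopB_nil]
    · cases hfa : frontA with
      | nil =>
        exfalso
        obtain ⟨b, hb⟩ := List.exists_mem_of_ne_nil frontB hBempty
        have hmm := (hfr b).mpr hb
        rw [hfa] at hmm
        exact List.not_mem_nil hmm
      | cons c rest =>
        rw [hfa] at hfr hfront hA
        obtain ⟨hin, hout⟩ := pvInner end_ d (c :: rest) [] ch vis hv hfront (by simp)
        have hflen : (c :: rest).length + 1 ≤ fA := by omega
        rw [pvLoopB, if_neg hBempty]
        by_cases hmem : end_ ∈ frontB
        · rw [if_pos hmem]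
          have hmemA : end_ ∈ c :: rest := (hfr end_).mpr hmem
          have hin' := hin hmemA (fA - (c :: rest).length)
          have hfA : fA = (fA - (c :: rest).length) + (c :: rest).length := by omega
          rw [hfA]
          exact hin'
        · rw [if_neg hmem]
          have hmemA : end_ ∉ c :: rest := fun h => hmem ((hfr end_).mp h)
          obtain ⟨ch', e1, e2, e3, e4⟩ := hout hmemA
          have e1' := e1 (fA - (c :: rest).length)
          simp only [List.reverse_nil] at e1'
          obtain ⟨ha, hb⟩ := pvFoldH_mem (c :: rest) [] vis (by simp)
          obtain ⟨na, nb⟩ := pvNewFront_mem (pvCands frontB) seen [] (by simp)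
          set S := (c :: rest).foldl (fun a c => (pvNbrs c).foldl pvStepH a) ([], vis) with hS
          set N := pvNewFront (pvCands frontB) seen [] with hN
          -- the mirror level fold and B's new frontier hold the same elements
          have hnm : ∀ x : Int, x ∈ S.1 ↔ x ∈ N.1 := by
            intro x
            rw [ha x, na x]
            unfold pvCands
            rw [List.mem_filter]
            simp only [List.mem_flatMap, List.not_mem_nil, false_or, Bool.and_eq_true,
              decide_eq_true_eq]
            constructor
            · rintro ⟨⟨cc, hcc, hxc⟩, h2, h3, h4⟩
              refine ⟨⟨⟨cc, (hfr cc).mp hcc, by simpa [pvNbrs] using hxc⟩, h2, h3⟩, ?_⟩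
              exact (hseen x).mp h4
            · rintro ⟨⟨⟨cc, hcc, hxc⟩, h2, h3⟩, h4⟩
              exact ⟨⟨cc, (hfr cc).mpr hcc, by simpa [pvNbrs] using hxc⟩, h2, h3,
                (hseen x).mpr h4⟩
          show pvLoopA fA end_ (c :: rest) [] ch = pvLoopB fB end_ N.1 N.2 ((d : Int) + 1)
          have hfA : fA = (fA - (c :: rest).length) + (c :: rest).length := by omega
          rw [hfA, e1']
          by_cases hLA : S.1 = []
          · have hnf : N.1 = [] := by
              rw [List.eq_nil_iff_forall_not_mem]
              intro x hx
              have hmm := (hnm x).mpr hx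
              rw [hLA] at hmm
              exact List.not_mem_nil hmm
            rw [hLA, hnf, pvLoopB_nil]
            simp only [List.reverse_nil]
            exact pvLoopA_nil _ _ _
          · have hlen1 : 1 ≤ S.1.length := by
              cases hl : S.1
              · exact absurd hl hLA
              · simp
            -- the flip of A's two-list queue at the level boundary
            have hflip : pvLoopA (fA - (c :: rest).length) end_ [] S.1.reverse ch'
                = pvLoopA (fA - (c :: rest).length - 1) end_ S.1 [] ch' := by
              have hrev : S.1.reverse ≠ [] := by
                intro h
                exact hLA (by simpa using congrArg List.reverse h)
              have hf2 : fA - (c :: rest).length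
                  = (fA - (c :: rest).length - 1) + 1 := by omega
              rw [hf2]
              cases hrv : S.1.reverse with
              | nil => exact absurd hrv hrev
              | cons y ys =>
                rw [pvLoopA]
                rw [← hrv, List.reverse_reverse]
                simp
            rw [hflip]
            have hd1 : (d : Int) + 1 = ((d + 1 : Nat) : Int) := by push_cast; ring
            rw [hd1]
            refine ih S.1 N.1 ch' S.2 N.2 (d + 1) _ ?_ ?_ e2 ?_ hnm ?_
            · simp only [List.length_nil] at e4
              omega
            · simp only [List.length_nil] at e4
              omega
            · intro x
              constructor
              · intro hx
                have hne : ¬ (S.2.getD x false = true) := by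
                  simp [hx]
                cases hh : N.2.contains x
                · rfl
                · rcases (nb x).mp hh with hs | hnf2
                  · exact absurd ((hb x).mpr (Or.inl (by
                      cases h : vis.getD x false
                      · exact absurd ((hseen x).mp h) (by simp [hs])
                      · rfl))) hne
                  · exact absurd ((hb x).mpr (Or.inr ((hnm x).mpr hnf2))) hne
              · intro hx
                cases hh : S.2.getD x false
                · rfl
                · exfalso
                  rcases (hb x).mp hh with hv' | hm'
                  · have := (hseen x).mpr (by
                      cases h : seen.contains x
                      · rfl
                      · exact absurd ((nb x).mpr (Or.inl h)) (by simp [hx]))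
                    rw [hv'] at this
                    cases this
                  · exact absurd ((nb x).mpr (Or.inr ((hnm x).mp hm'))) (by simp [hx])
            · intro x hx
              exact e3 x hx

-- the initial states of the two ports correspond
theorem pvHVis_init (start : Int) :
    pvHVis ((∅ : Std.HashMap Int Nat).insert start 1)
      ((∅ : Std.HashMap Int Bool).insert start true) := by
  intro n
  simp only [Std.HashMap.getD_insert]
  by_cases h : (start == n) = true
  · simp [h]
  · simp only [h, Bool.false_eq_true, if_false]
    simp

-- ===== VERDICT (by name: the statement is the Claim_ definition above) =====
theorem bfs_spec : Claim_equal_bfs := by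
  intro start end_ _ _
  unfold Spec_bfs bfs bfs_alt
  have h0 : ((0 : Nat) : Int) = 0 := rfl
  rw [← h0]
  have hle := pvCzA_le ((∅ : Std.HashMap Int Nat).insert start 1)
  refine pvSim end_ 200003 [start] [start] _ ((∅ : Std.HashMap Int Bool).insert start true)
    ((∅ : Std.HashSet Int).insert start) 0 500000 ?_ ?_ (pvHVis_init start) ?_
    (fun x => Iff.rfl) ?_
  · simp only [List.length_cons, List.length_nil]
    omega
  · omega
  · intro x
    by_cases hxe : x = start
    · subst hxe
      simp [Std.HashMap.getD_insert, Std.HashSet.contains_insert]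
    · have hnx : (start == x) = false := by
        rw [beq_eq_false_iff_ne]
        exact fun h => hxe h.symm
      simp [Std.HashMap.getD_insert, Std.HashSet.contains_insert, hnx]
  · intro x hx
    have hxe : x = start := by simpa using hx
    subst hxe
    simp
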